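-- pv_equiv track=rewrite | github.com/LeoYANQING/AskThenRearrange | study2_app/service.py | _detect_discussed_items
-- ===== SOURCE A (Python) =====
-- from typing import Any
--
-- def _detect_discussed_items(turns: list[dict[str, Any]], all_items: list[str]) -> list[str]:
--     discussed: list[str] = []
--     for item in all_items:
--         needle = item.lower()
--         for turn in turns:
--             haystacks = [
--                 str(turn.get("question", "")),
--                 str(turn.get("participant_answer_raw", "")),
--             ]
--             if any(needle in haystack.lower() for haystack in haystacks):
--                 discussed.append(item)
--                 break
--     return discussed
-- ===== SOURCE B (Python) =====
-- def _detect_discussed_items(turns, all_items):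
--     # Lower every haystack once, then scan turn-by-turn, retiring each needle
--     # as soon as it is found; emit matches in all_items order at the end.
--     texts = []
--     for turn in turns:
--         texts.append(str(turn.get("question", "")).lower())
--         texts.append(str(turn.get("participant_answer_raw", "")).lower())
--     pending = {item.lower() for item in all_items}
--     found = set()
--     for text in texts:
--         if not pending:
--             break
--         hit = {needle for needle in pending if needle in text}
--         found |= hit
--         pending -= hit
--     return [item for item in all_items if item.lower() in found]
-- ===== Notes on version B (the rewrite author's own statement) =====
-- stated objective: faster
-- what changed: B inverts the loop nesting: it lowers every turn's two haystacks once up front, scans text-by-text retiring each needle from a pending set as soon as it is found (with early exit when none remain), then emits matches in all_items order, instead of A's per-item rescan that re-lowers every haystack for every item.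
import Mathlib
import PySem

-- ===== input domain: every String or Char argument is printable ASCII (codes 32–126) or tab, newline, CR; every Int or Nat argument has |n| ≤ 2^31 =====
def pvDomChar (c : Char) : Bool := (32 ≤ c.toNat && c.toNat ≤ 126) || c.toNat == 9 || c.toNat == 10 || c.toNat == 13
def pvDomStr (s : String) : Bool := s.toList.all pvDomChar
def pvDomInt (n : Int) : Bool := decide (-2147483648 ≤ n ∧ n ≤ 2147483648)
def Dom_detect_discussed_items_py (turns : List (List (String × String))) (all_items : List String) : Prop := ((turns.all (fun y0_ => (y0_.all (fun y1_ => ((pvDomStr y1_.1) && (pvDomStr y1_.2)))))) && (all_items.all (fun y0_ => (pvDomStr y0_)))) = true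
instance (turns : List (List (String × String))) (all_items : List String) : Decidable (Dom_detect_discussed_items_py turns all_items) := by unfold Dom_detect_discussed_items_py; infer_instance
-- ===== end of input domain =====

-- B lowers every haystack once and scans turn-by-turn with a shrinking pending set
-- (alternative decomposition; constant-factor faster when items × turns is large).

-- ===== PORT A =====
-- item-outer loop: for each item, scan the turns and break on the first hit
def detect_discussed_items_py (turns : List (List (String × String))) (all_items : List String) : List String :=
  all_items.foldl (fun discussed item =>
    let needle := PySem.Str.lower item
    if turns.any (fun turn =>
        let haystacks := [PySem.Dict.getD (PySem.Dict.mk turn) "question" "",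
                          PySem.Dict.getD (PySem.Dict.mk turn) "participant_answer_raw" ""]
        haystacks.any (fun haystack => PySem.Str.isIn needle (PySem.Str.lower haystack)))
    then discussed ++ [item] else discussed) []

-- ===== PORT B =====
-- texts: every haystack of every turn, lowered once (turn-outer flattening)
def pvAltTexts (turns : List (List (String × String))) : List String :=
  turns.foldl (fun texts turn =>
    texts ++ [PySem.Str.lower (PySem.Dict.getD (PySem.Dict.mk turn) "question" ""),
              PySem.Str.lower (PySem.Dict.getD (PySem.Dict.mk turn) "participant_answer_raw" "")]) []

-- the for-text loop with its early break: retire found needles from pending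
def pvAltScan (texts : List String) (pending found : PySem.Set String) : PySem.Set String :=
  match texts with
  | [] => found
  | text :: rest =>
    if pending = [] then found
    else
      let hit := PySem.Set.ofList (List.filter (fun needle => PySem.Str.isIn needle text) pending)
      pvAltScan rest (PySem.Set.diff pending hit) (PySem.Set.union found hit)

def detect_discussed_items_py_alt (turns : List (List (String × String))) (all_items : List String) : List String :=
  let texts := pvAltTexts turns
  let found := pvAltScan texts (PySem.Set.ofList (all_items.map PySem.Str.lower)) PySem.Set.empty
  all_items.filter (fun item => PySem.Set.contains found (PySem.Str.lower item))

-- ===== PRECONDITION & SPEC =====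
def Spec_detect_discussed_items_py (turns : List (List (String × String))) (all_items : List String) (out : List String) : Prop := out = detect_discussed_items_py_alt turns all_items
instance (turns : List (List (String × String))) (all_items : List String) (out : List String) : Decidable (Spec_detect_discussed_items_py turns all_items out) := by unfold Spec_detect_discussed_items_py; infer_instance

-- ===== CLAIM (what is proved, stated in full; the proofs are below) =====
def Claim_equal_detect_discussed_items_py : Prop := ∀ (turns : List (List (String × String))) (all_items : List String), Dom_detect_discussed_items_py turns all_items → Spec_detect_discussed_items_py turns all_items (detect_discussed_items_py turns all_items)

-- ===== LEMMAS AND PROOFS =====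

-- membership in the scan result: found, or pending and occurring in one of the texts
theorem pvAltScan_mem (texts : List String) (pending found : PySem.Set String) (n : String) :
    n ∈ pvAltScan texts pending found ↔
      n ∈ found ∨ (n ∈ pending ∧ texts.any (fun t => PySem.Str.isIn n t) = true) := by
  induction texts generalizing pending found with
  | nil => simp [pvAltScan]
  | cons text rest ih =>
    by_cases hp : pending = []
    · simp [pvAltScan, hp]
    · simp only [pvAltScan, if_neg hp, ih, PySem.Set.mem_union, PySem.Set.mem_diff,
        PySem.Set.mem_ofList, List.mem_filter, List.any_cons, Bool.or_eq_true]
      tauto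

theorem pvAltTexts_eq (turns : List (List (String × String))) :
    pvAltTexts turns = turns.flatMap (fun turn =>
      [PySem.Str.lower (PySem.Dict.getD (PySem.Dict.mk turn) "question" ""),
       PySem.Str.lower (PySem.Dict.getD (PySem.Dict.mk turn) "participant_answer_raw" "")]) := by
  simpa [pvAltTexts] using PySem.List.foldl_append_eq_flatMap (l := turns) (acc := []) _

-- ===== VERDICT (by name: the statement is the Claim_ definition above) =====
theorem detect_discussed_items_py_spec : Claim_equal_detect_discussed_items_py := by
  intro turns all_items _
  unfold Spec_detect_discussed_items_py detect_discussed_items_py detect_discussed_items_py_alt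
  rw [PySem.List.foldl_append_if_eq_filter]
  simp only [List.nil_append]
  apply List.filter_congr
  intro item hitem
  rw [Bool.eq_iff_iff, PySem.Set.contains_iff, pvAltScan_mem, pvAltTexts_eq]
  have hmem : PySem.Str.lower item ∈ PySem.Set.ofList (all_items.map PySem.Str.lower) := by
    rw [PySem.Set.mem_ofList]; exact List.mem_map_of_mem hitem
  simp only [PySem.Set.empty, List.not_mem_nil, false_or, hmem, true_and,
    List.any_eq_true, List.mem_flatMap, List.any_cons, List.any_nil, Bool.or_eq_true,
    Bool.or_false, List.mem_cons, List.not_mem_nil, or_false]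
  constructor
  · rintro ⟨turn, ht, h | h⟩
    · exact ⟨_, ⟨turn, ht, Or.inl rfl⟩, h⟩
    · exact ⟨_, ⟨turn, ht, Or.inr rfl⟩, h⟩
  · rintro ⟨t, ⟨turn, ht, rfl | rfl⟩, h⟩
    · exact ⟨turn, ht, Or.inl h⟩
    · exact ⟨turn, ht, Or.inr h⟩
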